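-- pv_equiv track=rewrite | github.com/DominikaWiewiora/pp1 | 04-Subroutines/exercise 30.py | f
-- ===== SOURCE A (Python) =====
-- def f(number,even):
--     digit_sum=0
--     while number > 0:
--         digit = number % 10
--         if even and digit % 2 == 0:
--             digit_sum += digit
--         elif not even and digit % 2 != 0:
--             digit_sum += digit
--         number //= 10
--     return digit_sum
-- ===== SOURCE B (Python) =====
-- def f(number, even):
--     if number <= 0:
--         return 0
--     want = 0 if even else 1
--     total = 0
--     for c in str(number):
--         d = ord(c) - 48
--         if d % 2 == want:
--             total += d
--     return total
-- ===== Notes on version B (the rewrite author's own statement) =====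
-- stated objective: idiomatic
-- what changed: B extracts the decimal digits by iterating over str(number) instead of A's repeated %10 // 10 arithmetic loop, with a single parity target computed once instead of A's two-branch if/elif.
import Mathlib
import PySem

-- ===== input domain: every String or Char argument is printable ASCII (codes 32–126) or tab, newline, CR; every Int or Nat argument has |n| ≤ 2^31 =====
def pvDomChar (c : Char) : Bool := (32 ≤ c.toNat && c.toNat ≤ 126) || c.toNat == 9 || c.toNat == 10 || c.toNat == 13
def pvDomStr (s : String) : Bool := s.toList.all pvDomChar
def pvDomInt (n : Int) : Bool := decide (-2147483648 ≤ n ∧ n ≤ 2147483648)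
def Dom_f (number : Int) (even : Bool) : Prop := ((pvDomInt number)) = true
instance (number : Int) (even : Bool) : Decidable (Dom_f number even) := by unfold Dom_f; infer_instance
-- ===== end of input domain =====

-- B traverses the decimal digits via str(number) (ord(c) - 48) with one precomputed
-- parity target, instead of A's %10 // 10 arithmetic loop with two branches.


-- ===== PORT A =====
-- A's while loop: state (number, digit_sum), exits when number ≤ 0
def fLoop (number : Int) (even : Bool) (digit_sum : Int) : Int :=
  if _h : number > 0 then
    let digit := PySem.Int.mod number 10
    let digit_sum' :=
      if even && (PySem.Int.mod digit 2 == 0) then digit_sum + digit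
      else if !even && (PySem.Int.mod digit 2 != 0) then digit_sum + digit
      else digit_sum
    fLoop (PySem.Int.floordiv number 10) even digit_sum'
  else digit_sum
termination_by number.toNat
decreasing_by
  have h10 : (0:Int) < 10 := by omega
  have := PySem.Int.floordiv_eq_ediv_of_pos (a := number) h10
  omega

def f (number : Int) (even : Bool) : Int := fLoop number even 0

-- ===== PORT B =====
def f_alt (number : Int) (even : Bool) : Int :=
  if number ≤ 0 then 0
  else
    let want : Int := if even then 0 else 1
    (PySem.Int.toStr number).toList.foldl
      (fun total c =>
        let d : Int := (c.toNat : Int) - 48   -- ord(c) - 48, exact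
        if PySem.Int.mod d 2 == want then total + d else total)
      0

-- ===== PRECONDITION & SPEC =====
def Spec_f (number : Int) (even : Bool) (out : Int) : Prop := out = f_alt number even
instance (number : Int) (even : Bool) (out : Int) : Decidable (Spec_f number even out) := by unfold Spec_f; infer_instance

-- ===== CLAIM (what is proved, stated in full; the proofs are below) =====
def Claim_equal_f : Prop := ∀ (number : Int) (even : Bool), Dom_f number even → Spec_f number even (f number even)

-- ===== LEMMAS AND PROOFS =====

-- contribution of one decimal digit d (as a Nat < 10) under parity selector `even`
def digitW (even : Bool) (d : Nat) : Int :=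
  if (d % 2 == 0) = even then (d : Int) else 0

-- the filtered digit sum of a Nat, by the same %10 /10 recursion as A
def natSum (even : Bool) (n : Nat) : Int :=
  if n = 0 then 0 else digitW even (n % 10) + natSum even (n / 10)
decreasing_by exact Nat.div_lt_self (Nat.pos_of_ne_zero (by assumption)) (by omega)

-- weight of a digit character under B's test
def charW (even : Bool) (c : Char) : Int :=
  let d : Int := (c.toNat : Int) - 48
  if PySem.Int.mod d 2 == (if even then 0 else 1) then d else 0

lemma charW_digitChar (even : Bool) (d : Nat) (hd : d < 10) :
    charW even (Nat.digitChar d) = digitW even d := by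
  interval_cases d <;> cases even <;> decide

lemma fLoop_eq (even : Bool) : ∀ (n : Nat) (s : Int), fLoop (n : Int) even s = s + natSum even n := by
  intro n
  induction n using Nat.strong_induction_on with
  | _ n ih =>
    intro s
    rw [fLoop]
    by_cases h0 : n = 0
    · subst h0; simp [natSum]
    · have hpos : ((n : Int)) > 0 := by omega
      rw [dif_pos hpos]
      rw [natSum]
      rw [if_neg h0]
      have hmod : PySem.Int.mod (n : Int) 10 = ((n % 10 : Nat) : Int) :=
        PySem.Int.mod_natCast n 10
      have hdiv : PySem.Int.floordiv (n : Int) 10 = ((n / 10 : Nat) : Int) :=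
        PySem.Int.floordiv_natCast n 10
      rw [hmod, hdiv, ih (n / 10) (Nat.div_lt_self (Nat.pos_of_ne_zero h0) (by omega))]
      have hm2 : PySem.Int.mod ((n % 10 : Nat) : Int) 2 = ((n % 10 % 2 : Nat) : Int) :=
        PySem.Int.mod_natCast (n % 10) 2
      rw [hm2]
      unfold digitW
      cases even <;> rcases Nat.mod_two_eq_zero_or_one (n % 10) with h | h <;>
        simp [h] <;> ring

lemma fLoop_nonpos (number : Int) (even : Bool) (s : Int) (h : ¬ number > 0) :
    fLoop number even s = s := by
  rw [fLoop, dif_neg h]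

-- B's fold over a char list is the sum of charW
lemma foldB (even : Bool) (l : List Char) (s : Int) :
    l.foldl (fun total c =>
        let d : Int := (c.toNat : Int) - 48
        if PySem.Int.mod d 2 == (if even then 0 else 1) then total + d else total) s
      = s + (l.map (charW even)).sum := by
  have hf : (fun (total : Int) (c : Char) =>
        let d : Int := (c.toNat : Int) - 48
        if PySem.Int.mod d 2 == (if even then 0 else 1) then total + d else total)
      = (fun total c => total + charW even c) := by
    funext total c
    unfold charW
    cases h : (PySem.Int.mod ((c.toNat : Int) - 48) 2 == (if even then (0:Int) else 1)) <;>
      simp only [h] <;> simp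
  rw [hf, PySem.List.foldl_add l (charW even) s]

-- the charW-sum over toDigitsCore's output is natSum, by fuel induction
lemma sum_toDigitsCore (even : Bool) :
    ∀ (fuel n : Nat) (acc : List Char), n < fuel →
      ((Nat.toDigitsCore 10 fuel n acc).map (charW even)).sum
        = natSum even n + ((acc.map (charW even)).sum) := by
  intro fuel
  induction fuel with
  | zero => intro n acc h; omega
  | succ fuel ih =>
    intro n acc h
    rw [Nat.toDigitsCore]
    by_cases hz : n / 10 = 0
    · rw [if_pos hz]
      conv_rhs => rw [natSum]
      by_cases h0 : n = 0
      · subst h0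
        simp [charW_digitChar even 0 (by omega), digitW]
      · rw [if_neg h0, hz, natSum, if_pos rfl]
        simp [charW_digitChar even (n % 10) (Nat.mod_lt n (by omega))]
    · rw [if_neg hz]
      have h0 : n ≠ 0 := by omega
      have hlt : n / 10 < fuel := by omega
      rw [ih (n / 10) _ hlt]
      conv_rhs => rw [natSum]
      rw [if_neg h0]
      simp [charW_digitChar even (n % 10) (Nat.mod_lt n (by omega))]
      ring

-- ===== VERDICT (by name: the statement is the Claim_ definition above) =====
theorem f_spec : Claim_equal_f := by
  intro number even _
  unfold Spec_f f f_alt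
  by_cases h : number ≤ 0
  · rw [if_pos h, fLoop_nonpos number even 0 (by omega)]
  · rw [if_neg h]
    have hpos : 0 < number := by omega
    have hn : number = ((number.toNat : Nat) : Int) := by omega
    rw [PySem.Int.toList_toStr]
    rw [foldB even]
    unfold PySem.Int.toChars
    rw [if_neg (by omega)]
    unfold Nat.toDigits
    rw [sum_toDigitsCore even (number.toNat + 1) number.toNat [] (by omega)]
    conv_lhs => rw [hn]
    rw [fLoop_eq even number.toNat 0]
    simp
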